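-- pv_equiv track=rewrite | github.com/Dong-Jun-Shin/Study_Algorithm_Python | programmers/level2/c30_42839.py | get_cases
-- ===== SOURCE A (Python) =====
-- from itertools import permutations, chain
--
-- def get_cases(numbers):
--     numbers = list(map(str, numbers))
--     cases = []
--     for i in range(len(numbers)):
--         cases.append(list(permutations(numbers, len(numbers) - i)))
--     cases = [int(''.join(s)) for s in chain(*cases)]
--     cases = list(set(cases))
--     cases.sort()
--     return cases
--
-- numbers = "011"
-- ===== SOURCE B (Python) =====
-- def get_cases(numbers):
--     digits = [str(c) for c in numbers]
--     found = set()
--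
--     def dfs(cur, remaining):
--         for i, d in enumerate(remaining):
--             nxt = cur + d
--             found.add(int(nxt))
--             dfs(nxt, remaining[:i] + remaining[i + 1:])
--
--     dfs("", digits)
--     return sorted(found)
-- ===== Notes on version B (the rewrite author's own statement) =====
-- stated objective: alternative
-- what changed: Replaces the itertools.permutations-per-length enumeration, chain-flatten and set()/sort pipeline by a hand-written recursive backtracking DFS over the remaining digit-strings that records int(prefix) for every non-empty prefix into a set, then returns sorted(set).
import Mathlib
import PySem

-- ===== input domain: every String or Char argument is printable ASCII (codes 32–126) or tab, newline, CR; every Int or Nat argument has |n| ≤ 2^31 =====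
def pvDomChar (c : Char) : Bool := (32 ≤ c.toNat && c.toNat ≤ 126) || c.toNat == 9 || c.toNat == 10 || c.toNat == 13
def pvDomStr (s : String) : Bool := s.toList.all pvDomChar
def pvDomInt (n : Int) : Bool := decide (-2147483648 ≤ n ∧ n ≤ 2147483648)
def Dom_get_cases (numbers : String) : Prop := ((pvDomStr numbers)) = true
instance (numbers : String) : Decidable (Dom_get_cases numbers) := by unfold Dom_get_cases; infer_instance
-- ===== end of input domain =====

-- B replaces the itertools.permutations enumeration by a hand-written recursive DFS over the
-- remaining digit-strings that records int(prefix) for every non-empty prefix (objective: alternative).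

-- int(s) for a char list; the .getD 0 is never reached under Pre_ (all-digit strings parse)
def pvToIntD (s : List Char) : Int := (PySem.Int.ofChars? s).getD 0

-- ===== PORT A =====
-- list(map(str, numbers)) = the one-char strings of `numbers`, modelled at the Chars level;
-- ''.join(s) on char-lists is List.flatten (exact); itertools.permutations is PySem.List.permutations;
-- list(set(cases)) followed by .sort() is sorted(set(cases)) — order-independent, so exact.
def get_cases (numbers : String) : List Int :=
  let nums : List (List Char) := numbers.toList.map (fun c => [c])
  let cases : List (List (List (List Char))) :=
    (List.range nums.length).foldl
      (fun acc i => acc ++ [PySem.List.permutations nums (nums.length - i)]) []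
  let ints : List Int := cases.flatten.map (fun s => pvToIntD s.flatten)
  PySem.List.sorted (PySem.Set.ofList ints) (fun x => x)

-- ===== PORT B =====
-- dfs(cur, remaining): the `for i, d in enumerate(remaining)` loop is pvDfsGo indexing i upward;
-- remaining[:i] + remaining[i+1:] is List.eraseIdx i.
mutual
def pvDfs (cur : List Char) (rem : List (List Char)) (found : PySem.Set Int) : PySem.Set Int :=
  pvDfsGo cur rem found 0
termination_by (rem.length, rem.length + 2)

def pvDfsGo (cur : List Char) (rem : List (List Char)) (found : PySem.Set Int) (i : Nat) :
    PySem.Set Int :=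
  if h : i < rem.length then
    let nxt := cur ++ rem[i]
    pvDfsGo cur rem (pvDfs nxt (rem.eraseIdx i) (PySem.Set.add found (pvToIntD nxt))) (i + 1)
  else found
termination_by (rem.length, rem.length + 1 - i)
decreasing_by
  · simp [List.length_eraseIdx, h]; omega
  · simp; omega
end

def get_cases_alt (numbers : String) : List Int :=
  let digits : List (List Char) := numbers.toList.map (fun c => [c])
  PySem.List.sorted (pvDfs [] digits PySem.Set.empty) (fun x => x)

-- ===== PRECONDITION & SPEC =====
-- Pre_ excludes exactly the inputs on which the Python A raises: any non-digit character makes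
-- int() raise ValueError on some length-1 permutation.
def Pre_get_cases (numbers : String) : Prop := numbers.toList.all (fun c => c.isDigit) = true
instance (numbers : String) : Decidable (Pre_get_cases numbers) := by unfold Pre_get_cases; infer_instance

def pvWitness_get_cases : String := ("011")

def Spec_get_cases (numbers : String) (out : List Int) : Prop := out = get_cases_alt numbers
instance (numbers : String) (out : List Int) : Decidable (Spec_get_cases numbers out) := by unfold Spec_get_cases; infer_instance

-- ===== CLAIM (what is proved, stated in full; the proofs are below) =====
def Claim_equal_get_cases : Prop := ∀ (numbers : String), Dom_get_cases numbers → Pre_get_cases numbers → Spec_get_cases numbers (get_cases numbers)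

-- ===== LEMMAS AND PROOFS =====

-- x is the int of cur followed by some non-empty partial permutation of rem
def pvContrib (cur : List Char) (rem : List (List Char)) (x : Int) : Prop :=
  ∃ r p, 1 ≤ r ∧ p ∈ PySem.List.permutations rem r ∧ x = pvToIntD (cur ++ p.flatten)

lemma pvContrib_nil (cur : List Char) (x : Int) : ¬ pvContrib cur [] x := by
  rintro ⟨r, p, hr, hp, -⟩
  obtain ⟨r', rfl⟩ := Nat.exists_eq_add_of_le hr
  rw [Nat.add_comm, PySem.List.permutations_nil_succ] at hp
  exact absurd hp (List.not_mem_nil)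

-- one-step decomposition of pvContrib along the first chosen index
lemma pvContrib_step (cur : List Char) (rem : List (List Char)) (x : Int) :
    pvContrib cur rem x ↔
      ∃ j, ∃ hj : j < rem.length,
        (x = pvToIntD (cur ++ rem[j]) ∨ pvContrib (cur ++ rem[j]) (rem.eraseIdx j) x) := by
  constructor
  · rintro ⟨r, p, hr, hp, rfl⟩
    obtain ⟨r', rfl⟩ := Nat.exists_eq_add_of_le hr
    rw [Nat.add_comm, PySem.List.permutations_succ] at hp
    rw [List.mem_flatMap] at hp
    obtain ⟨j, hjr, hpj⟩ := hp
    rw [List.mem_range] at hjr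
    refine ⟨j, hjr, ?_⟩
    rw [List.getElem?_eq_getElem hjr] at hpj
    simp only [List.mem_map] at hpj
    obtain ⟨p', hp', rfl⟩ := hpj
    rcases Nat.eq_zero_or_pos r' with hz | hpos
    · subst hz
      rw [PySem.List.permutations_zero, List.mem_singleton] at hp'
      subst hp'
      left; simp
    · right
      exact ⟨r', p', hpos, hp', by simp⟩
  · rintro ⟨j, hj, h | ⟨r, p, hr, hp, rfl⟩⟩
    · refine ⟨1, [rem[j]], le_refl 1, ?_, by simpa using h⟩
      rw [PySem.List.permutations_succ, List.mem_flatMap]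
      refine ⟨j, List.mem_range.mpr hj, ?_⟩
      rw [List.getElem?_eq_getElem hj]
      simp [PySem.List.permutations_zero]
    · refine ⟨r + 1, rem[j] :: p, by omega, ?_, by simp⟩
      rw [PySem.List.permutations_succ, List.mem_flatMap]
      refine ⟨j, List.mem_range.mpr hj, ?_⟩
      rw [List.getElem?_eq_getElem hj]
      simp only [List.mem_map]
      exact ⟨p, hp, rfl⟩

-- membership in the DFS loop, assuming the membership fact for shorter remainders
lemma pvDfsGo_mem (N : Nat)
    (IH : ∀ rem : List (List Char), rem.length ≤ N → ∀ cur found x,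
      x ∈ pvDfs cur rem found ↔ x ∈ found ∨ pvContrib cur rem x)
    (rem : List (List Char)) (hlen : rem.length ≤ N + 1) (cur : List Char) (x : Int) :
    ∀ k i found, rem.length - i ≤ k →
      (x ∈ pvDfsGo cur rem found i ↔ x ∈ found ∨
        ∃ j, i ≤ j ∧ ∃ hj : j < rem.length,
          (x = pvToIntD (cur ++ rem[j]) ∨ pvContrib (cur ++ rem[j]) (rem.eraseIdx j) x)) := by
  intro k
  induction k with
  | zero =>
    intro i found hk
    rw [pvDfsGo]
    have hge : ¬ i < rem.length := by omega
    simp only [hge, dite_false]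
    constructor
    · exact Or.inl
    · rintro (h | ⟨j, hij, hj, -⟩)
      · exact h
      · omega
  | succ k ihk =>
    intro i found hk
    rw [pvDfsGo]
    by_cases h : i < rem.length
    · simp only [h, dite_true]
      rw [ihk (i + 1) _ (by omega)]
      rw [IH (rem.eraseIdx i) (by rw [List.length_eraseIdx]; simp [h]; omega)]
      rw [PySem.Set.mem_add]
      constructor
      · rintro (((hf | hx) | hc) | ⟨j, hij, hj, hb⟩)
        · exact Or.inl hf
        · exact Or.inr ⟨i, le_refl i, h, Or.inl hx⟩
        · exact Or.inr ⟨i, le_refl i, h, Or.inr hc⟩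
        · exact Or.inr ⟨j, by omega, hj, hb⟩
      · rintro (hf | ⟨j, hij, hj, hb⟩)
        · exact Or.inl (Or.inl (Or.inl hf))
        · rcases Nat.lt_or_ge i j with hij' | hij'
          · exact Or.inr ⟨j, by omega, hj, hb⟩
          · have : j = i := by omega
            subst this
            rcases hb with hx | hc
            · exact Or.inl (Or.inl (Or.inr hx))
            · exact Or.inl (Or.inr hc)
    · simp only [h, dite_false]
      constructor
      · exact Or.inl
      · rintro (hf | ⟨j, hij, hj, -⟩)
        · exact hf
        · omega

lemma pvDfs_mem (N : Nat) : ∀ rem : List (List Char), rem.length ≤ N → ∀ cur found x,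
    x ∈ pvDfs cur rem found ↔ x ∈ found ∨ pvContrib cur rem x := by
  induction N with
  | zero =>
    intro rem hlen cur found x
    have : rem = [] := List.length_eq_zero_iff.mp (by omega)
    subst this
    rw [pvDfs, pvDfsGo]
    simp only [List.length_nil, Nat.not_lt_zero, dite_false]
    constructor
    · exact Or.inl
    · rintro (h | hc)
      · exact h
      · exact absurd hc (pvContrib_nil cur x)
  | succ N ihN =>
    intro rem hlen cur found x
    rw [pvDfs, pvDfsGo_mem N ihN rem hlen cur x rem.length 0 found (by omega)]
    rw [pvContrib_step]
    constructor
    · rintro (hf | ⟨j, -, hj, hb⟩)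
      · exact Or.inl hf
      · exact Or.inr ⟨j, hj, hb⟩
    · rintro (hf | ⟨j, hj, hb⟩)
      · exact Or.inl hf
      · exact Or.inr ⟨j, Nat.zero_le j, hj, hb⟩

-- the DFS only ever extends `found` with Set.add, so it stays duplicate-free
lemma pvDfsGo_nodup (N : Nat)
    (IH : ∀ rem : List (List Char), rem.length ≤ N → ∀ cur found,
      found.Nodup → (pvDfs cur rem found).Nodup)
    (rem : List (List Char)) (hlen : rem.length ≤ N + 1) (cur : List Char) :
    ∀ k i found, rem.length - i ≤ k → found.Nodup → (pvDfsGo cur rem found i).Nodup := by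
  intro k
  induction k with
  | zero =>
    intro i found hk hnd
    rw [pvDfsGo]
    have hge : ¬ i < rem.length := by omega
    simpa only [hge, dite_false] using hnd
  | succ k ihk =>
    intro i found hk hnd
    rw [pvDfsGo]
    by_cases h : i < rem.length
    · simp only [h, dite_true]
      refine ihk (i + 1) _ (by omega) ?_
      refine IH (rem.eraseIdx i) (by rw [List.length_eraseIdx]; simp [h]; omega) _ _ ?_
      exact PySem.Set.nodup_add found _ hnd
    · simpa only [h, dite_false] using hnd

lemma pvDfs_nodup (N : Nat) : ∀ rem : List (List Char), rem.length ≤ N → ∀ cur found,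
    found.Nodup → (pvDfs cur rem found).Nodup := by
  induction N with
  | zero =>
    intro rem hlen cur found hnd
    have : rem = [] := List.length_eq_zero_iff.mp (by omega)
    subst this
    rw [pvDfs, pvDfsGo]
    simpa using hnd
  | succ N ihN =>
    intro rem hlen cur found hnd
    rw [pvDfs]
    exact pvDfsGo_nodup N ihN rem hlen cur rem.length 0 found (by omega) hnd

-- A's flat int list has exactly the pvContrib [] elements
lemma memA (nums : List (List Char)) (x : Int) :
    (x ∈ (((List.range nums.length).foldl
        (fun acc i => acc ++ [PySem.List.permutations nums (nums.length - i)]) []).flatten.map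
          (fun s => pvToIntD s.flatten)) ↔ pvContrib [] nums x) := by
  rw [PySem.List.foldl_append_singleton_eq_map]
  simp only [List.nil_append, List.mem_map, List.mem_flatten, List.mem_range]
  constructor
  · rintro ⟨s, ⟨l, ⟨⟨i, hi, rfl⟩, hs⟩⟩, rfl⟩
    exact ⟨nums.length - i, s, by omega, hs, by simp⟩
  · rintro ⟨r, p, hr, hp, rfl⟩
    have hrn : r ≤ nums.length := by
      by_contra hgt
      rw [PySem.List.permutations_eq_nil_of_length_lt r nums (by omega)] at hp
      exact absurd hp (List.not_mem_nil)
    refine ⟨p, ⟨PySem.List.permutations nums r, ⟨⟨nums.length - r, by omega, by congr 1; omega⟩, hp⟩⟩, by simp⟩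

-- ===== VERDICT (by name: the statement is the Claim_ definition above) =====
theorem get_cases_spec : Claim_equal_get_cases := by
  intro numbers _ _
  show get_cases numbers = get_cases_alt numbers
  rw [get_cases, get_cases_alt]
  rw [PySem.List.sorted_id_eq_sorted_id_iff_perm]
  set nums : List (List Char) := numbers.toList.map (fun c => [c]) with hnums
  rw [List.perm_ext_iff_of_nodup (PySem.Set.nodup_ofList _)
      (pvDfs_nodup nums.length nums (le_refl _) [] PySem.Set.empty List.nodup_nil)]
  intro x
  rw [PySem.Set.mem_ofList, memA nums x,
    pvDfs_mem nums.length nums (le_refl _) [] PySem.Set.empty x]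
  constructor
  · exact Or.inr
  · rintro (h | h)
    · exact absurd h (List.not_mem_nil)
    · exact h
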